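-- pv_equiv track=rewrite | github.com/i-am-wololo/cours | TP/i21/1/Parcours/parcours.py | parcours_zigzag
-- ===== SOURCE A (Python) =====
-- def parcours_zigzag(n):
--     result = []
--     i = 0
--     j = 0
--     direct = 1
--     while j<=n:
--         while 0<=i<n and 0<=j<n:
--             result.append((i,j))
--             i+=direct
--         direct = -direct
--         i+=direct
--         j+=1
--     return result
-- ===== SOURCE B (Python) =====
-- def parcours_zigzag(n):
--     result = []
--     for j in range(n):
--         cols = range(n) if j % 2 == 0 else range(n - 1, -1, -1)
--         for i in cols:
--             result.append((i, j))
--     return result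
-- ===== Notes on version B (the rewrite author's own statement) =====
-- stated objective: simpler
-- what changed: Replaced the while loops threading a mutable position i and a direction accumulator with boundary clamping by two for loops that recompute each column's direction from the column's parity.
import Mathlib
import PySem

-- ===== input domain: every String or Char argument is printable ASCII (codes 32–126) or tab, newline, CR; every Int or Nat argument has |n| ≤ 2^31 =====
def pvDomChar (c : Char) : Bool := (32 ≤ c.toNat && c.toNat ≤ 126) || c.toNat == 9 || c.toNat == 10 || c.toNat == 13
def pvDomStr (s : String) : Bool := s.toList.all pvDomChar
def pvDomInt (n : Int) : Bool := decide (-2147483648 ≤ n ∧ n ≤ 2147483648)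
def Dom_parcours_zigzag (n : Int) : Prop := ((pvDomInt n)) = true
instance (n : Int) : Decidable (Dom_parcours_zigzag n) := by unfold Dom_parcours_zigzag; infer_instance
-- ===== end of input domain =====

-- B replaces A's while loops (mutable position i, direction accumulator, boundary clamping)
-- with two for loops that recompute each column's direction from the column's parity.

-- ===== PORT A =====
-- inner 'while 0<=i<n and 0<=j<n': fuel is only a totality guard (the loop runs at most n steps)
def pvInnerA (fuel : Nat) (n j direct : Int) (i : Int) (acc : List (Int × Int)) :
    List (Int × Int) × Int :=
  match fuel with
  | 0 => (acc, i)
  | Nat.succ f =>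
    if 0 ≤ i ∧ i < n ∧ 0 ≤ j ∧ j < n then
      pvInnerA f n j direct (i + direct) (acc ++ [(i, j)])
    else (acc, i)

-- outer 'while j<=n': after the inner loop, direct flips and i moves by the new direct
def pvOuterA (fuel : Nat) (n i j direct : Int) (acc : List (Int × Int)) : List (Int × Int) :=
  match fuel with
  | 0 => acc
  | Nat.succ f =>
    if j ≤ n then
      let r := pvInnerA (n.toNat + 1) n j direct i acc
      pvOuterA f n (r.2 + (-direct)) (j + 1) (-direct) r.1
    else acc

def parcours_zigzag (n : Int) : List (Int × Int) :=
  pvOuterA (n.toNat + 2) n 0 0 1 []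

-- ===== PORT B =====
def parcours_zigzag_alt (n : Int) : List (Int × Int) :=
  (PySem.List.pyRange 0 n 1).foldl
    (fun result j =>
      let cols := if PySem.Int.mod j 2 = 0 then PySem.List.pyRange 0 n 1
                  else PySem.List.pyRange (n - 1) (-1) (-1)
      cols.foldl (fun r i => r ++ [(i, j)]) result)
    []

-- ===== PRECONDITION & SPEC =====
def Spec_parcours_zigzag (n : Int) (out : List (Int × Int)) : Prop := out = parcours_zigzag_alt n
instance (n : Int) (out : List (Int × Int)) : Decidable (Spec_parcours_zigzag n out) := by unfold Spec_parcours_zigzag; infer_instance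

-- ===== CLAIM (what is proved, stated in full; the proofs are below) =====
def Claim_equal_parcours_zigzag : Prop := ∀ (n : Int), Dom_parcours_zigzag n → Spec_parcours_zigzag n (parcours_zigzag n)

-- ===== LEMMAS AND PROOFS =====

-- B's fold restarted at column j (proof helper)
def pvBFrom (n j : Int) (acc : List (Int × Int)) : List (Int × Int) :=
  (PySem.List.pyRange j n 1).foldl
    (fun result j =>
      let cols := if PySem.Int.mod j 2 = 0 then PySem.List.pyRange 0 n 1
                  else PySem.List.pyRange (n - 1) (-1) (-1)
      cols.foldl (fun r i => r ++ [(i, j)]) result)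
    acc

lemma pvBFrom_zero (n : Int) : pvBFrom n 0 [] = parcours_zigzag_alt n := rfl

lemma pvInnerA_up (fuel : Nat) (n j : Int) : ∀ (i : Int) (acc : List (Int × Int)),
    0 ≤ j → j < n → 0 ≤ i → i ≤ n → (n - i).toNat ≤ fuel →
    pvInnerA fuel n j 1 i acc
      = (acc ++ (PySem.List.pyRange i n 1).map (fun k => (k, j)), n) := by
  induction fuel with
  | zero =>
    intro i acc hj hjn hi hin hfuel
    have : i = n := by omega
    subst this
    simp [pvInnerA, PySem.List.pyRange_one_eq_nil le_rfl]
  | succ f ih =>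
    intro i acc hj hjn hi hin hfuel
    by_cases h : i < n
    · rw [pvInnerA, if_pos ⟨hi, h, hj, hjn⟩, ih (i + 1) (acc ++ [(i, j)]) hj hjn (by omega)
        (by omega) (by omega), PySem.List.pyRange_one_cons h]
      simp
    · have : i = n := by omega
      subst this
      rw [pvInnerA, if_neg (by omega)]
      simp [PySem.List.pyRange_one_eq_nil le_rfl]

lemma pvInnerA_down (fuel : Nat) (n j : Int) : ∀ (i : Int) (acc : List (Int × Int)),
    0 ≤ j → j < n → -1 ≤ i → i < n → (i + 1).toNat ≤ fuel →
    pvInnerA fuel n j (-1) i acc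
      = (acc ++ (PySem.List.pyRange i (-1) (-1)).map (fun k => (k, j)), -1) := by
  induction fuel with
  | zero =>
    intro i acc hj hjn hi hin hfuel
    have : i = -1 := by omega
    subst this
    simp [pvInnerA, PySem.List.pyRange_neg_one_eq_nil le_rfl]
  | succ f ih =>
    intro i acc hj hjn hi hin hfuel
    by_cases h : 0 ≤ i
    · have h1 : (-1 : Int) ≤ i + -1 := by omega
      have h2 : i + -1 < n := by omega
      have h3 : (i + -1 + 1).toNat ≤ f := by omega
      rw [pvInnerA, if_pos ⟨h, hin, hj, hjn⟩, ih (i + -1) (acc ++ [(i, j)]) hj hjn h1 h2 h3,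
        PySem.List.pyRange_neg_one_cons (by omega : (-1 : Int) < i)]
      simp
      rw [show i + (-1 : Int) = i - 1 by ring]
    · have : i = -1 := by omega
      subst this
      rw [pvInnerA, if_neg (by omega)]
      simp [PySem.List.pyRange_neg_one_eq_nil le_rfl]

lemma pvOuterA_stop (f : Nat) (n i j direct : Int) (acc : List (Int × Int)) (h : ¬ j ≤ n) :
    pvOuterA (Nat.succ f) n i j direct acc = acc := by
  rw [pvOuterA, if_neg h]

lemma pvOuterA_eq (fuel : Nat) (n : Int) : ∀ (j : Int) (acc : List (Int × Int)),
    0 ≤ j → j ≤ n → (n - j).toNat + 2 ≤ fuel →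
    pvOuterA fuel n (if PySem.Int.mod j 2 = 0 then 0 else n - 1) j
        (if PySem.Int.mod j 2 = 0 then 1 else -1) acc
      = pvBFrom n j acc := by
  induction fuel with
  | zero => intro j acc _ _ hfuel; omega
  | succ f ih =>
    intro j acc hj hjn hfuel
    have hmod : PySem.Int.mod j 2 = j % 2 := PySem.Int.mod_eq_emod_of_pos (by omega)
    have hmod' : PySem.Int.mod (j + 1) 2 = (j + 1) % 2 :=
      PySem.Int.mod_eq_emod_of_pos (by omega)
    by_cases hlt : j < n
    · -- one full column, then the tail by IH
      rw [pvBFrom, PySem.List.pyRange_one_cons hlt]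
      rw [List.foldl_cons]
      by_cases hpar : PySem.Int.mod j 2 = 0
      · rw [pvOuterA, if_pos hjn, if_pos hpar]
        simp only [if_pos hpar]
        rw [pvInnerA_up (n.toNat + 1) n j 0 acc hj hlt le_rfl (by omega) (by omega)]
        have hnext : ¬ PySem.Int.mod (j + 1) 2 = 0 := by rw [hmod'] at *; rw [hmod] at hpar; omega
        have := ih (j + 1) (acc ++ (PySem.List.pyRange 0 n 1).map (fun k => (k, j)))
          (by omega) (by omega) (by omega)
        rw [if_neg hnext, if_neg hnext] at this
        rw [show n + -(1:Int) = n - 1 by ring]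
        rw [this, pvBFrom]
        congr 1
        rw [PySem.List.foldl_append_singleton_eq_map]
      · rw [pvOuterA, if_pos hjn, if_neg hpar]
        simp only [if_neg hpar]
        rw [pvInnerA_down (n.toNat + 1) n j (n - 1) acc hj hlt (by omega) (by omega) (by omega)]
        have hnext : PySem.Int.mod (j + 1) 2 = 0 := by rw [hmod'] at *; rw [hmod] at hpar; omega
        have := ih (j + 1) (acc ++ (PySem.List.pyRange (n - 1) (-1) (-1)).map (fun k => (k, j)))
          (by omega) (by omega) (by omega)
        rw [if_pos hnext, if_pos hnext] at this
        simp only [neg_neg]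
        rw [show (-1 : Int) + 1 = 0 by ring]
        rw [this, pvBFrom]
        congr 1
        rw [PySem.List.foldl_append_singleton_eq_map]
    · -- j = n: the inner loop does nothing, the next outer test fails
      have hje : j = n := by omega
      subst hje
      rw [pvOuterA, if_pos le_rfl]
      have hinner : ∀ d i, pvInnerA (j.toNat + 1) j j d i acc = (acc, i) := by
        intro d i
        rw [pvInnerA, if_neg (by omega)]
      obtain ⟨f', rfl⟩ : ∃ f', f = Nat.succ f' := by
        cases f with
        | zero => omega
        | succ f' => exact ⟨f', rfl⟩
      simp only [hinner]
      rw [pvOuterA_stop _ _ _ _ _ _ (by omega)]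
      rw [pvBFrom, PySem.List.pyRange_one_eq_nil le_rfl, List.foldl_nil]

-- ===== VERDICT (by name: the statement is the Claim_ definition above) =====
theorem parcours_zigzag_spec : Claim_equal_parcours_zigzag := by
  intro n _
  unfold Spec_parcours_zigzag parcours_zigzag
  by_cases hn : 0 ≤ n
  · have := pvOuterA_eq (n.toNat + 2) n 0 [] le_rfl hn (by omega)
    simp only [show PySem.Int.mod 0 2 = 0 from rfl, if_pos] at this
    rw [this, pvBFrom_zero]
  · rw [show n.toNat + 2 = Nat.succ (n.toNat + 1) from rfl,
      pvOuterA_stop _ _ _ _ _ _ (by omega)]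
    unfold parcours_zigzag_alt
    rw [PySem.List.pyRange_one_eq_nil (by omega), List.foldl_nil]
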